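-- pv_equiv track=rewrite | github.com/katarzynaadamczyk/AoC | Day_23/task1.py | containsonerightamphipod
-- ===== SOURCE A (Python) =====
-- roomforamphipod = {2: 'A', 4: 'B', 6: 'C', 8: 'D'}
--
-- def containsonerightamphipod(burrow, posx):
--     if len(burrow[posx]) > 1:
--         for room in range(len(burrow[posx])):
--             if burrow[posx][room] != '.':
--                 if burrow[posx][room] == roomforamphipod[posx] and room == 2:
--                     return True
--                 return False
--     return False
-- ===== SOURCE B (Python) =====
-- roomforamphipod = {2: 'A', 4: 'B', 6: 'C', 8: 'D'}
--
-- def containsonerightamphipod(burrow, posx):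
--     cells = burrow[posx]
--     if len(cells) <= 1 or all(c == '.' for c in cells):
--         return False
--     return cells[0] == '.' and cells[1] == '.' and cells[2] == roomforamphipod[posx]
-- ===== Notes on version B (the rewrite author's own statement) =====
-- stated objective: simpler
-- what changed: Replaces A's index loop with progressive early returns by an all-dots emptiness test plus a fixed-position check of cells[0], cells[1] and cells[2] against the room's letter.
import Mathlib
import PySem

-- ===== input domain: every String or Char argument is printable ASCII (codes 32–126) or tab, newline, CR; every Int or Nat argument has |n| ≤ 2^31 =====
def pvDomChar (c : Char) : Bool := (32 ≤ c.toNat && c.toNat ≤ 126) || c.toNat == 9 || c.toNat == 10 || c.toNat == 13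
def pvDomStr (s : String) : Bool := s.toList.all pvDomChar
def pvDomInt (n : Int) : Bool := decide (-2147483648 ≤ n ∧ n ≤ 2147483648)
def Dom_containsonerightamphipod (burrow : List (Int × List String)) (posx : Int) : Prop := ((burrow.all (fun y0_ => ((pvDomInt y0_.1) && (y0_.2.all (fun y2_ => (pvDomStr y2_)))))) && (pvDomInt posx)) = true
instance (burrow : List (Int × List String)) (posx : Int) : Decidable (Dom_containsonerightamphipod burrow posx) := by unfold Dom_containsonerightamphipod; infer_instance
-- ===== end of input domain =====

-- B replaces A's scanning loop with a fixed-position check; equivalence is about return values on inputs where A returns (Pre_ excludes A's KeyErrors).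

-- ===== PORT A =====
def roomforamphipodA : PySem.Dict Int String := PySem.Dict.ofList [(2, "A"), (4, "B"), (6, "C"), (8, "D")]

-- the for-loop over range(len(cells)): first non-'.' cell decides; room is the running index
def aScan (posx : Int) : List String → Nat → Bool
  | [], _ => false
  | c :: rest, room =>
    if c ≠ "." then
      if c = PySem.Dict.getD roomforamphipodA posx "" ∧ room = 2 then true else false
    else aScan posx rest (room + 1)

def containsonerightamphipod (burrow : List (Int × List String)) (posx : Int) : Bool :=
  match burrow.lookup posx with
  | none => false          -- KeyError in Python; excluded by Pre_
  | some cells => if cells.length > 1 then aScan posx cells 0 else false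

-- ===== PORT B =====
def roomforamphipodB : List (Int × String) := [(2, "A"), (4, "B"), (6, "C"), (8, "D")]

def containsonerightamphipod_alt (burrow : List (Int × List String)) (posx : Int) : Bool :=
  match burrow.lookup posx with
  | none => false          -- KeyError in Python; excluded by Pre_
  | some cells =>
    if cells.length ≤ 1 || cells.all (· == ".") then false
    else (cells.getD 0 "" == ".") && (cells.getD 1 "" == ".") &&
         (cells.getD 2 "" == (roomforamphipodB.lookup posx).getD "")

-- ===== PRECONDITION & SPEC =====
-- Pre_ holds exactly where the Python A returns: posx must be a key of burrow, and if the
-- room has length > 1 with a non-'.' cell, posx must be a key of roomforamphipod (else KeyError).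
def Pre_containsonerightamphipod (burrow : List (Int × List String)) (posx : Int) : Prop :=
  burrow.lookup posx ≠ none ∧
    (((burrow.lookup posx).getD []).length ≤ 1 ∨ (∀ c ∈ (burrow.lookup posx).getD [], c = ".") ∨
      posx = 2 ∨ posx = 4 ∨ posx = 6 ∨ posx = 8)

instance (burrow : List (Int × List String)) (posx : Int) : Decidable (Pre_containsonerightamphipod burrow posx) := by unfold Pre_containsonerightamphipod; infer_instance

def pvWitness_containsonerightamphipod : (List (Int × List String)) × Int := ([(2, [".", ".", "A"])], 2)

def Spec_containsonerightamphipod (burrow : List (Int × List String)) (posx : Int) (out : Bool) : Prop := out = containsonerightamphipod_alt burrow posx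
instance (burrow : List (Int × List String)) (posx : Int) (out : Bool) : Decidable (Spec_containsonerightamphipod burrow posx out) := by unfold Spec_containsonerightamphipod; infer_instance

-- ===== CLAIM (what is proved, stated in full; the proofs are below) =====
def Claim_equal_containsonerightamphipod : Prop := ∀ (burrow : List (Int × List String)) (posx : Int), Dom_containsonerightamphipod burrow posx → Pre_containsonerightamphipod burrow posx → Spec_containsonerightamphipod burrow posx (containsonerightamphipod burrow posx)

-- ===== LEMMAS AND PROOFS =====

-- once the index is past 2, the loop can never return True
theorem aScan_ge3 (posx : Int) (cells : List String) (room : Nat) (h : 3 ≤ room) :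
    aScan posx cells room = false := by
  induction cells generalizing room with
  | nil => rfl
  | cons c rest ih =>
    simp only [aScan]
    split
    · have : ¬ room = 2 := by omega
      simp [this]
    · exact ih (room + 1) (by omega)

theorem core_eq (posx : Int) (cells : List String)
    (hpre : cells.length ≤ 1 ∨ (∀ c ∈ cells, c = ".") ∨ posx = 2 ∨ posx = 4 ∨ posx = 6 ∨ posx = 8) :
    (if cells.length > 1 then aScan posx cells 0 else false) =
      (if cells.length ≤ 1 || cells.all (· == ".") then false
       else (cells.getD 0 "" == ".") && (cells.getD 1 "" == ".") &&
            (cells.getD 2 "" == (roomforamphipodB.lookup posx).getD "")) := by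
  by_cases hlen : cells.length ≤ 1
  · simp [hlen, Nat.not_lt.mpr hlen]
  · have hgt : cells.length > 1 := Nat.lt_of_not_le hlen
    match cells, hgt with
    | a :: b :: rest, _ =>
      by_cases ha : a = "."
      · by_cases hb : b = "."
        · subst ha; subst hb
          match rest with
          | [] => simp [aScan]
          | c :: rest' =>
            by_cases hc : c = "."
            · subst hc
              by_cases hall : ∀ x ∈ rest', x = "."
              · have : ∀ x ∈ ("." :: "." :: "." :: rest' : List String), x = "." := by
                  intro x hx; simp only [List.mem_cons] at hx
                  rcases hx with h | h | h | h
                  exacts [h, h, h, hall x h]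
                have h1 : (("." :: "." :: "." :: rest' : List String)).all (· == ".") = true := by
                  simp only [List.all_eq_true]; intro x hx
                  simp [this x hx]
                simp only [aScan, h1]
                simp [aScan_ge3 posx rest' 3 (by omega)]
              · -- not all '.', so Pre forces posx ∈ {2,4,6,8}; target letter ≠ "."
                have hkey : posx = 2 ∨ posx = 4 ∨ posx = 6 ∨ posx = 8 := by
                  rcases hpre with h | h | h
                  · simp at h
                  · exfalso; apply hall; intro x hx; exact h x (by simp [hx])
                  · exact h
                have h1 : (("." :: "." :: "." :: rest' : List String)).all (· == ".") = false := by
                  simp only [List.all_eq_false]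
                  push_neg at hall
                  obtain ⟨x, hx, hxne⟩ := hall
                  exact ⟨x, by simp [hx], by simp [hxne]⟩
                simp only [aScan, h1]
                have htgt : ("." : String) ≠ (roomforamphipodB.lookup posx).getD "" := by
                  rcases hkey with h | h | h | h <;> subst h <;> decide
                simp [aScan_ge3 posx rest' 3 (by omega), htgt]
            · -- first non-'.' cell is at room = 2
              have hkey : posx = 2 ∨ posx = 4 ∨ posx = 6 ∨ posx = 8 := by
                rcases hpre with h | h | h
                · simp at h
                · exact absurd (h c (by simp)) hc
                · exact h
              have hall : (("." :: "." :: c :: rest' : List String)).all (· == ".") = false := by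
                simp only [List.all_eq_false]
                exact ⟨c, by simp, by simp [hc]⟩
              have htgt : PySem.Dict.getD roomforamphipodA posx "" = (roomforamphipodB.lookup posx).getD "" := by
                rcases hkey with h | h | h | h <;> subst h <;> decide
              simp only [aScan, hall, htgt]
              by_cases he : c = (roomforamphipodB.lookup posx).getD ""
              · have hne : ¬(roomforamphipodB.lookup posx).getD "" = "." := fun hdot => hc (he.trans hdot)
                simp [he, hne]
              · simp [hc, he]
        · -- first non-'.' at room = 1 → A false; B: cells[1] ≠ '.' → false
          have hall : ((a :: b :: rest : List String)).all (· == ".") = false := by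
            simp only [List.all_eq_false]
            exact ⟨b, by simp, by simp [hb]⟩
          subst ha
          simp [aScan, hall, hb]
      · -- first non-'.' at room = 0 → A false; B: cells[0] ≠ '.' → false
        have hall : ((a :: b :: rest : List String)).all (· == ".") = false := by
          simp only [List.all_eq_false]
          exact ⟨a, by simp, by simp [ha]⟩
        simp [aScan, hall, ha]

-- ===== VERDICT (by name: the statement is the Claim_ definition above) =====
theorem containsonerightamphipod_spec : Claim_equal_containsonerightamphipod := by
  intro burrow posx _ hpre
  unfold Spec_containsonerightamphipod containsonerightamphipod containsonerightamphipod_alt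
  unfold Pre_containsonerightamphipod at hpre
  obtain ⟨hsome, hpre⟩ := hpre
  cases h : burrow.lookup posx with
  | none => exact absurd h hsome
  | some cells =>
    rw [h] at hpre
    simp only [Option.getD_some] at hpre
    exact core_eq posx cells hpre
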